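-- pv_equiv track=rewrite | github.com/oonaghmw/year1Python | histogram.py | histogram_lengths
-- ===== SOURCE A (Python) =====
-- def histogram_lengths(L):
-- 	"""
-- 	Counts the number of letters in each item in a list of strings.
-- 	Args:
-- 		L   - list of strings to calculate how many letters in each item
-- 	Returns - list H, where the index value H[i] is the number of words with
-- 			  i letters in L.
-- 	"""
-- 	H = []
--
-- 	for i in L:
-- 		Hlength = len(H) - 1 #subtract 1 to ignore H[0]
--
-- 		if len(i) > Hlength:
-- 			diff = len(i) - Hlength
-- 			#make list long enough for longest word, no arbitrary minumum
-- 			H.extend([0]*diff)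
--
-- 		H[len(i)] = H[len(i)] + 1
--
-- 	return H
-- ===== SOURCE B (Python) =====
-- def histogram_lengths(L):
--     """Count words by length: frequency dict first, then build the list in one shot."""
--     if not L:
--         return []
--     counts = {}
--     for w in L:
--         counts[len(w)] = counts.get(len(w), 0) + 1
--     m = max(len(w) for w in L)
--     return [counts.get(i, 0) for i in range(m + 1)]
-- ===== Notes on version B (the rewrite author's own statement) =====
-- stated objective: simpler
-- what changed: Replaces A's grow-on-demand list that is extended and incremented in place during a single pass by a count pass into a length-frequency dict followed by a direct build of [counts.get(i,0) for i in range(max_len+1)].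
import Mathlib
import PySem

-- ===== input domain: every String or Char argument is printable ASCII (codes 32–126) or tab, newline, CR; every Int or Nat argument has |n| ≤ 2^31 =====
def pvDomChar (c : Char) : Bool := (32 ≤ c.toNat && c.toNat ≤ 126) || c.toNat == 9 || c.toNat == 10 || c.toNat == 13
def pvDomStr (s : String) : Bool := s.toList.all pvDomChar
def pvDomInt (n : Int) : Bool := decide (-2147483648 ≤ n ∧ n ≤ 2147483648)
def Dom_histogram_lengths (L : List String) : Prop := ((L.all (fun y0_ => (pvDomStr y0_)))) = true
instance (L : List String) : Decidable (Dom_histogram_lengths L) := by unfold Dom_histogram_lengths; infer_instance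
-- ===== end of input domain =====

-- B replaces A's grow-and-increment single pass by a length-frequency dict plus a direct
-- [counts.get(i,0) for i in range(max+1)] build; same cost, simpler shape.


-- ===== PORT A =====
-- one iteration of A's loop: extend H with zeros when the word is longer than len(H)-1,
-- then H[len(i)] += 1 (the index is always in range after the extend, so set/getD are exact)
def histAStep (H : List Int) (w : String) : List Int :=
  let n : Int := PySem.Str.len w
  let Hlength : Int := (H.length : Int) - 1
  let H' := if n > Hlength then H ++ List.replicate (n - Hlength).toNat (0 : Int) else H
  H'.set n.toNat (H'.getD n.toNat 0 + 1)


def histogram_lengths (L : List String) : List Int := L.foldl histAStep []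

-- ===== PORT B =====
def histogram_lengths_alt (L : List String) : List Int :=
  match L with
  | [] => []
  | _ :: _ =>
    let counts := L.foldl
      (fun d w => d.insert (PySem.Str.len w) (d.getD (PySem.Str.len w) 0 + 1))
      (PySem.Dict.empty : PySem.Dict Int Int)
    match PySem.List.max? (L.map PySem.Str.len) (fun x => x) with
    | some m => (PySem.List.pyRange 0 (m + 1) 1).map (fun i => counts.getD i 0)
    | none => []   -- unreachable: L is nonempty

-- ===== PRECONDITION & SPEC =====
def Spec_histogram_lengths (L : List String) (out : List Int) : Prop := out = histogram_lengths_alt L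
instance (L : List String) (out : List Int) : Decidable (Spec_histogram_lengths L out) := by unfold Spec_histogram_lengths; infer_instance

-- ===== CLAIM (what is proved, stated in full; the proofs are below) =====
def Claim_equal_histogram_lengths : Prop := ∀ (L : List String), Dom_histogram_lengths L → Spec_histogram_lengths L (histogram_lengths L)

-- ===== LEMMAS AND PROOFS =====
theorem pad_getD (H : List Int) (k j : Nat) :
    (H ++ List.replicate k (0 : Int)).getD j 0 = H.getD j 0 := by
  by_cases h : j < H.length
  · simp [List.getD_eq_getElem?_getD, List.getElem?_append_left h]
  · have h' : H.length ≤ j := Nat.le_of_not_lt h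
    simp [List.getD_eq_getElem?_getD, List.getElem?_append_right h', List.getElem?_replicate,
      List.getElem?_eq_none h']
    split <;> simp

theorem histAStep_length (H : List Int) (w : String) :
    (histAStep H w).length = max H.length (w.length + 1) := by
  have hl : w.length = w.length := by simp
  simp only [histAStep, PySem.Str.len_eq]
  split
  · next h => simp; omega
  · next h => simp at h ⊢; omega

theorem getD_set (X : List Int) (i j : Nat) (v : Int) (hi : i < X.length) :
    (X.set i v).getD j 0 = if j = i then v else X.getD j 0 := by
  by_cases h : j = i
  · simp [h, List.getD_eq_getElem?_getD, hi]
  · simp [h, List.getD_eq_getElem?_getD, List.getElem?_set_ne (by omega : i ≠ j)]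

theorem histAStep_getD (H : List Int) (w : String) (j : Nat) :
    (histAStep H w).getD j 0 = H.getD j 0 + (if j = w.length then 1 else 0) := by
  have hl : w.length = w.length := by simp
  simp only [histAStep, PySem.Str.len_eq]
  split
  · next h =>
    rw [getD_set _ _ _ _ (by simp; omega)]
    simp only [Int.toNat_natCast, pad_getD]
    by_cases hj : j = w.length <;> simp [hj]
  · next h =>
    rw [getD_set _ _ _ _ (by simp at h ⊢; omega)]
    by_cases hj : j = w.length <;> simp [hj]

theorem foldA_length : ∀ (L : List String) (H : List Int),
    (L.foldl histAStep H).length = L.foldl (fun a w => max a (w.length + 1)) H.length := by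
  intro L
  induction L with
  | nil => intro H; rfl
  | cons w t ih => intro H; simp only [List.foldl_cons, ih, histAStep_length]

theorem foldA_getD : ∀ (L : List String) (H : List Int) (j : Nat),
    (L.foldl histAStep H).getD j 0
      = H.getD j 0 + ((L.map (fun w => w.length)).count j : Int) := by
  intro L
  induction L with
  | nil => intro H j; simp
  | cons w t ih =>
    intro H j
    simp only [List.foldl_cons, ih, histAStep_getD, List.map_cons, List.count_cons]
    rcases eq_or_ne j w.length with hj | hj
    · simp [hj]
      ring
    · simp [hj, Ne.symm hj]

theorem fold_max_succ : ∀ (t : List String) (a : Nat),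
    t.foldl (fun acc w => max acc (w.length + 1)) (a + 1)
      = ((t.map PySem.Str.len).foldl max (a : Int)).toNat + 1 := by
  intro t
  induction t with
  | nil => intro a; simp
  | cons w s ih =>
    intro a
    simp only [List.map_cons, List.foldl_cons, PySem.Str.len_eq]
    have h1 : max ((a : Int)) ((w.toList.length : Nat) : Int) = ((max a w.length : Nat) : Int) := by
      simp [Nat.cast_max]
    rw [h1]
    have h2 : max (a + 1) (w.length + 1) = (max a w.length) + 1 := by omega
    rw [h2, ih]

theorem count_map_cast (l : List Nat) (k : Nat) :
    (l.map (Nat.cast : Nat → Int)).count (k : Int) = l.count k :=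
  List.count_map_of_injective l _ Nat.cast_injective k

theorem getD_eq_getElem_int (xs : List Int) (k : Nat) (h : k < xs.length) :
    xs.getD k 0 = xs[k] := by
  simp [List.getD_eq_getElem?_getD, List.getElem?_eq_getElem h]

-- ===== VERDICT (by name: the statement is the Claim_ definition above) =====
theorem histogram_lengths_spec : Claim_equal_histogram_lengths := by
  unfold Claim_equal_histogram_lengths
  intro L _
  unfold Spec_histogram_lengths
  match L with
  | [] => rfl
  | w :: t =>
    simp only [histogram_lengths, histogram_lengths_alt]
    have hmax : PySem.List.max? ((w :: t).map PySem.Str.len) (fun x => x)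
        = some ((t.map PySem.Str.len).foldl max (PySem.Str.len w)) := by
      simp [PySem.List.max?_id_cons]
    rw [hmax]
    set m : Int := (t.map PySem.Str.len).foldl max (PySem.Str.len w) with hm
    have hcounts : (w :: t).foldl
        (fun d (v : String) => d.insert (PySem.Str.len v) (d.getD (PySem.Str.len v) 0 + 1))
        (PySem.Dict.empty : PySem.Dict Int Int)
        = PySem.Dict.counter ((w :: t).map PySem.Str.len) := by
      rw [← PySem.Dict.foldl_insert_getD_add_one_eq_counter, List.foldl_map]
    rw [hcounts]
    have hlenA : ((w :: t).foldl histAStep []).length = (m + 1).toNat := by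
      rw [foldA_length]
      simp only [List.foldl_cons, List.length_nil, Nat.zero_max]
      rw [fold_max_succ t w.length, hm]
      have : PySem.Str.len w = ((w.length : Nat) : Int) := by simp [PySem.Str.len_eq]
      rw [this]
      have hnn : (0:Int) ≤ (t.map PySem.Str.len).foldl max ((w.length : Nat) : Int) := by
        calc (0:Int) ≤ ((w.length : Nat) : Int) := by positivity
        _ ≤ _ := (PySem.List.le_foldl_max _ _).1
      omega
    apply List.ext_getElem
    · simpa [PySem.List.length_pyRange_one] using hlenA
    · intro k hk hk'
      rw [← getD_eq_getElem_int _ _ hk, foldA_getD]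
      have hgk : ((PySem.List.pyRange 0 (m + 1) 1).map
          (fun i => (PySem.Dict.counter ((w :: t).map PySem.Str.len)).getD i 0))[k]'hk'
          = (PySem.Dict.counter ((w :: t).map PySem.Str.len)).getD ((0:Int) + k) 0 := by
        rw [List.getElem_map, PySem.List.getElem_pyRange_one]
      rw [hgk, PySem.Dict.getD_counter]
      have hmapeq : (w :: t).map PySem.Str.len
          = ((w :: t).map (fun v => v.length)).map (Nat.cast : Nat → Int) := by
        simp [List.map_map, PySem.Str.len_eq, Function.comp]
      rw [hmapeq, zero_add, count_map_cast]
      simp
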